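-- pv_equiv track=rewrite | github.com/PillowGit/aoc | src/2015/5.py | sln2
-- ===== SOURCE A (Python) =====
-- def sln2(input):
--   def check_str(s):
--     for i in range(len(s) - 2):
--       if s[i] == s[i + 2]:
--         break
--     else:
--       return False
--     for i in range(len(s) - 3):
--       if s[i:i+2] in s[i+2:]:
--         return True
--     return False
--   return sum(check_str(s) for s in input)
-- ===== SOURCE B (Python) =====
-- def sln2(input):
--   def check(s):
--     gap = any(a == c for a, c in zip(s, s[2:]))
--     seen = set()
--     prev = None
--     pair = False
--     for p in zip(s, s[1:]):
--       if p in seen: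
--         pair = True
--         break
--       if prev is not None:
--         seen.add(prev)
--       prev = p
--     return gap and pair
--   return sum(check(s) for s in input)
-- ===== Notes on version B (the rewrite author's own statement) =====
-- stated objective: alternative
-- what changed: Per string, replaces the scan that substring-searches s[i:i+2] in s[i+2:] for every i with a single pass over adjacent pairs that checks each pair against a set of pairs seen at least two positions earlier, and checks the gap-repeat with one zip pass.
import Mathlib
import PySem

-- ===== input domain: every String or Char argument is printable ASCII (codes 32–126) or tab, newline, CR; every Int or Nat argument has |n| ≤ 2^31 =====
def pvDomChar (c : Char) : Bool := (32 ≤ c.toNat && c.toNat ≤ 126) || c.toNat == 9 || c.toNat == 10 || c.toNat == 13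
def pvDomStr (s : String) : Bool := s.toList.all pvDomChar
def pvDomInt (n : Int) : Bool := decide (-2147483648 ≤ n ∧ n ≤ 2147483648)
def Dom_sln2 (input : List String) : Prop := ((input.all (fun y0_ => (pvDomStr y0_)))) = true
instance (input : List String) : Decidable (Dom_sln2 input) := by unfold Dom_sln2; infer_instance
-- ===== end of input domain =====

-- B replaces A's per-string substring-search scan with a single pass over adjacent
-- pairs using a set of pairs seen at least two positions earlier (objective: alternative).

-- ===== PORT A =====
-- check_str, transliterated: the first index loop (whose break/else is a search over
-- range(len(s)-2)), then the substring loop over range(len(s)-3).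
def sln2_check (s : String) : Bool :=
  let l := s.toList
  if (PySem.List.pyRange 0 (PySem.Str.len s - 2) 1).any
       (fun i => PySem.List.pyGetD l i ' ' == PySem.List.pyGetD l (i + 2) ' ') then
    (PySem.List.pyRange 0 (PySem.Str.len s - 3) 1).any
      (fun i => PySem.Chars.isIn (PySem.List.slice l (some i) (some (i + 2)))
                                 (PySem.List.slice l (some (i + 2)) none))
  else false

def sln2 (input : List String) : Int :=
  input.foldl (fun acc s => acc + (if sln2_check s then 1 else 0)) 0

-- ===== PORT B =====
-- gap = any(a == c for a, c in zip(s, s[2:]))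
def sln2_altGap (l : List Char) : Bool :=
  (l.zip (l.drop 2)).any (fun ac => ac.1 == ac.2)

-- the one-pass pair loop: `seen` holds the pairs at least two positions back, `prev`
-- the previous pair (it joins `seen` one step later, so overlapping pairs never match)
def sln2_altPair (seen : PySem.Set (Char × Char)) (prev : Option (Char × Char)) :
    List (Char × Char) → Bool
  | [] => false
  | p :: rest =>
    if PySem.Set.contains seen p then true
    else sln2_altPair (match prev with
                       | none => seen
                       | some q => PySem.Set.add seen q) (some p) rest

def sln2_altCheck (s : String) : Bool :=
  let l := s.toList
  sln2_altGap l && sln2_altPair PySem.Set.empty none (l.zip (l.drop 1))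

def sln2_alt (input : List String) : Int :=
  input.foldl (fun acc s => acc + (if sln2_altCheck s then 1 else 0)) 0

-- ===== PRECONDITION & SPEC =====
def Spec_sln2 (input : List String) (out : Int) : Prop := out = sln2_alt input
instance (input : List String) (out : Int) : Decidable (Spec_sln2 input out) := by unfold Spec_sln2; infer_instance

-- ===== CLAIM (what is proved, stated in full; the proofs are below) =====
def Claim_equal_sln2 : Prop := ∀ (input : List String), Dom_sln2 input → Spec_sln2 input (sln2 input)

-- ===== LEMMAS AND PROOFS =====

-- the repeat-with-gap condition both checks decide
def GapProp (l : List Char) : Prop := ∃ i : Nat, i + 2 < l.length ∧ l[i]? = l[i + 2]?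

-- the non-overlapping repeated-pair condition both checks decide
def PairProp (l : List Char) : Prop :=
  ∃ i j : Nat, i + 2 ≤ j ∧ j + 1 < l.length ∧ l[i]? = l[j]? ∧ l[i + 1]? = l[j + 1]?

theorem gapA_iff (l : List Char) :
    ((PySem.List.pyRange 0 ((l.length : Int) - 2) 1).any
       (fun i => PySem.List.pyGetD l i ' ' == PySem.List.pyGetD l (i + 2) ' ') = true)
      ↔ GapProp l := by
  rw [List.any_eq_true]
  constructor
  · rintro ⟨i, hmem, hEq⟩
    rw [PySem.List.mem_pyRange_one] at hmem
    obtain ⟨h0, h1⟩ := hmem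
    refine ⟨i.toNat, by omega, ?_⟩
    rw [PySem.List.pyGetD_eq_getElem l ' ' h0 (by omega),
        PySem.List.pyGetD_eq_getElem l ' ' (by omega) (by omega)] at hEq
    have h2 : (i + 2).toNat = i.toNat + 2 := by omega
    simp only [h2] at hEq
    simp only [beq_iff_eq] at hEq
    rw [List.getElem?_eq_getElem (by omega), List.getElem?_eq_getElem (by omega), hEq]
  · rintro ⟨k, hk, hEq⟩
    refine ⟨(k : Int), ?_, ?_⟩
    · rw [PySem.List.mem_pyRange_one]; omega
    · rw [PySem.List.pyGetD_eq_getElem l ' ' (by omega) (by omega),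
          PySem.List.pyGetD_eq_getElem l ' ' (by omega) (by omega)]
      have h2 : ((k : Int) + 2).toNat = k + 2 := by omega
      rw [List.getElem?_eq_getElem (by omega), List.getElem?_eq_getElem (by omega)] at hEq
      simp only [Option.some_inj] at hEq
      simp [h2, Int.toNat_natCast, hEq]

theorem gapB_iff (l : List Char) : sln2_altGap l = true ↔ GapProp l := by
  unfold sln2_altGap
  rw [List.any_eq_true]
  constructor
  · rintro ⟨⟨a, c⟩, hmem, hEq⟩
    rw [List.mem_iff_getElem] at hmem
    obtain ⟨k, hk, hget⟩ := hmem
    have hlen : (l.zip (l.drop 2)).length = min l.length (l.length - 2) := by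
      simp [List.length_zip]
    rw [List.getElem_zip] at hget
    have hk2 : k + 2 < l.length := by omega
    refine ⟨k, hk2, ?_⟩
    have h1 : l[k] = a := by simpa using congrArg Prod.fst hget
    have h2 : (l.drop 2)[k]'(by simp; omega) = c := by simpa using congrArg Prod.snd hget
    rw [List.getElem_drop] at h2
    simp only [beq_iff_eq] at hEq
    rw [List.getElem?_eq_getElem (by omega), List.getElem?_eq_getElem hk2]
    simp only [Option.some_inj]
    have h3 : l[k + 2]'hk2 = l[2 + k]'(by omega) := by congr 1; omega
    rw [h1, h3, h2]; exact hEq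
  · rintro ⟨k, hk, hEq⟩
    rw [List.getElem?_eq_getElem (by omega), List.getElem?_eq_getElem hk] at hEq
    simp only [Option.some_inj] at hEq
    refine ⟨(l[k], l[k+2]), ?_, by simpa using hEq⟩
    rw [List.mem_iff_getElem]
    refine ⟨k, by simp [List.length_zip]; omega, ?_⟩
    rw [List.getElem_zip]
    congr 1
    rw [List.getElem_drop]
    congr 1
    omega

theorem prefix2_iff (a b : Char) (t : List Char) :
    [a, b] <+: t ↔ t[0]? = some a ∧ t[1]? = some b := by
  match t with
  | [] => simp
  | [x] => simp [List.prefix_cons_iff]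
  | x :: y :: r =>
    constructor
    · rintro ⟨u, hu⟩
      simp at hu
      simp [hu.1, hu.2.1]
    · rintro ⟨h1, h2⟩
      simp at h1 h2
      exact ⟨r, by simp [h1, h2]⟩

theorem take2drop (l : List Char) (k : Nat) (h : k + 1 < l.length) :
    (l.drop k).take 2 = [l[k], l[k + 1]] := by
  apply List.ext_getElem?
  intro n
  match n with
  | 0 => simp [List.getElem?_drop]
  | 1 => simp [List.getElem?_drop, List.getElem?_eq_getElem (show k + 1 < l.length by omega)]
  | (n+2) => simp

theorem isIn2_iff (a b : Char) (t : List Char) :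
    PySem.Chars.isIn [a, b] t = true ↔ ∃ j : Nat, t[j]? = some a ∧ t[j + 1]? = some b := by
  rw [← PySem.Chars.exists_prefix_drop_iff_isIn]
  constructor
  · rintro ⟨j, hj⟩
    rw [prefix2_iff] at hj
    exact ⟨j, by simpa [List.getElem?_drop] using hj⟩
  · rintro ⟨j, h1, h2⟩
    exact ⟨j, by rw [prefix2_iff]; simp [List.getElem?_drop, h1, h2]⟩

theorem pairA_iff (l : List Char) :
    ((PySem.List.pyRange 0 ((l.length : Int) - 3) 1).any
       (fun i => PySem.Chars.isIn (PySem.List.slice l (some i) (some (i + 2)))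
                                  (PySem.List.slice l (some (i + 2)) none)) = true)
      ↔ PairProp l := by
  rw [List.any_eq_true]
  constructor
  · rintro ⟨i, hmem, hIn⟩
    rw [PySem.List.mem_pyRange_one] at hmem
    obtain ⟨h0, h1⟩ := hmem
    set k := i.toNat with hk
    rw [PySem.List.slice_toNat l h0 (by omega), PySem.List.slice_from l (by omega)] at hIn
    have ht2 : (i + 2).toNat = k + 2 := by omega
    have htk : (i + 2).toNat - i.toNat = 2 := by omega
    rw [htk, ht2, take2drop l k (by omega)] at hIn
    rw [isIn2_iff] at hIn
    obtain ⟨j, hj1, hj2⟩ := hIn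
    rw [List.getElem?_drop] at hj1
    rw [List.getElem?_drop] at hj2
    obtain ⟨hb, hv⟩ := List.getElem?_eq_some_iff.mp hj2
    refine ⟨k, k + 2 + j, by omega, by omega, ?_, ?_⟩
    · rw [hj1, List.getElem?_eq_getElem (show k < l.length by omega)]
    · rw [show k + 2 + j + 1 = k + 2 + (j + 1) by omega, hj2,
          List.getElem?_eq_getElem (show k + 1 < l.length by omega)]
  · rintro ⟨i, j, hij, hj1, e1, e2⟩
    refine ⟨(i : Int), ?_, ?_⟩
    · rw [PySem.List.mem_pyRange_one]; omega
    · rw [PySem.List.slice_toNat l (by omega) (by omega), PySem.List.slice_from l (by omega)]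
      have ht2 : ((i : Int) + 2).toNat = i + 2 := by omega
      have htk : ((i : Int) + 2).toNat - (i : Int).toNat = 2 := by omega
      rw [htk, ht2, Int.toNat_natCast, take2drop l i (by omega)]
      rw [isIn2_iff]
      refine ⟨j - (i + 2), ?_, ?_⟩
      · rw [List.getElem?_drop, show i + 2 + (j - (i + 2)) = j by omega, ← e1,
            List.getElem?_eq_getElem (show i < l.length by omega)]
      · rw [List.getElem?_drop, show i + 2 + (j - (i + 2) + 1) = j + 1 by omega, ← e2,
            List.getElem?_eq_getElem (show i + 1 < l.length by omega)]

-- invariant of B's pair loop: `seen` holds S, `prev` the previous pair; the loop hits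
-- true exactly when some pair matches S, prev (one step back) or a pair two steps back
theorem altPair_iff (S : PySem.Set (Char × Char)) (prev : Option (Char × Char))
    (ps : List (Char × Char)) :
    sln2_altPair S prev ps = true ↔
      ∃ k, ∃ _ : k < ps.length,
        ps[k] ∈ S ∨ (1 ≤ k ∧ prev = some ps[k]) ∨ (∃ j, j + 2 ≤ k ∧ ps[j]? = ps[k]?) := by
  induction ps generalizing S prev with
  | nil => simp [sln2_altPair]
  | cons p rest ih =>
    have hstep : sln2_altPair S prev (p :: rest)
        = (if PySem.Set.contains S p then true
           else sln2_altPair (match prev with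
                              | none => S
                              | some q => PySem.Set.add S q) (some p) rest) := rfl
    rw [hstep]
    by_cases hp : p ∈ S
    · rw [if_pos ((PySem.Set.contains_iff S p).mpr hp)]
      exact iff_of_true rfl ⟨0, by simp, Or.inl (by simpa using hp)⟩
    · rw [if_neg (fun h => hp ((PySem.Set.contains_iff S p).mp h))]
      rw [ih]
      constructor
      · rintro ⟨k, hk, hcase⟩
        refine ⟨k + 1, by simpa using Nat.succ_lt_succ hk, ?_⟩
        rcases hcase with h | ⟨hk1, hprev⟩ | ⟨j, hj, hjk⟩
        · match prev with
          | none => exact Or.inl (by simpa using h)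
          | some q =>
            rcases (PySem.Set.mem_add S q _).mp h with h' | h'
            · exact Or.inl (by simpa using h')
            · exact Or.inr (Or.inl ⟨by omega, by simp [h']⟩)
        · simp only [Option.some_inj] at hprev
          refine Or.inr (Or.inr ⟨0, by omega, ?_⟩)
          simp [hprev, List.getElem?_eq_getElem hk]
        · exact Or.inr (Or.inr ⟨j + 1, by omega, by simpa using hjk⟩)
      · rintro ⟨k, hk, hcase⟩
        match k, hk with
        | 0, hk =>
          rcases hcase with h | ⟨h1, _⟩ | ⟨j, hj, _⟩
          · exact absurd (by simpa using h) hp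
          · omega
          · omega
        | (k+1), hk =>
          refine ⟨k, by simpa using Nat.lt_of_succ_lt_succ hk, ?_⟩
          rcases hcase with h | ⟨_, hprev⟩ | ⟨j, hj, hjk⟩
          · match prev with
            | none => exact Or.inl (by simpa using h)
            | some q => exact Or.inl ((PySem.Set.mem_add S q _).mpr (Or.inl (by simpa using h)))
          · match prev with
            | none => simp at hprev
            | some q =>
              exact Or.inl ((PySem.Set.mem_add S q _).mpr (Or.inr (by simpa using hprev.symm)))
          · match j, hj with
            | 0, hj =>
              refine Or.inr (Or.inl ⟨by omega, ?_⟩)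
              have hp0 : some p = rest[k]? := by simpa using hjk
              rw [List.getElem?_eq_getElem (by simpa using Nat.lt_of_succ_lt_succ hk)] at hp0
              simp [← hp0]
            | (j+1), hj =>
              exact Or.inr (Or.inr ⟨j, by omega, by simpa using hjk⟩)

theorem zip1_getElem? (l : List Char) (m : Nat) (hm : m + 1 < l.length) :
    (l.zip (l.drop 1))[m]? = some (l[m], l[m + 1]) := by
  have hlen : (l.zip (l.drop 1)).length = l.length - 1 := by simp [List.length_zip]
  rw [List.getElem?_eq_getElem (by omega)]
  congr 1
  rw [List.getElem_zip]
  congr 1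
  rw [List.getElem_drop]
  congr 1
  omega

theorem pairB_iff (l : List Char) :
    sln2_altPair PySem.Set.empty none (l.zip (l.drop 1)) = true ↔ PairProp l := by
  rw [altPair_iff]
  have hlen : (l.zip (l.drop 1)).length = l.length - 1 := by simp [List.length_zip]
  constructor
  · rintro ⟨k, hk, hcase⟩
    rcases hcase with h | ⟨_, h⟩ | ⟨j, hj, hjk⟩
    · simp [PySem.Set.empty] at h
    · simp at h
    · have hk1 : k + 1 < l.length := by omega
      have hj1 : j + 1 < l.length := by omega
      rw [zip1_getElem? l j hj1, zip1_getElem? l k hk1] at hjk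
      simp only [Option.some_inj, Prod.mk.injEq] at hjk
      refine ⟨j, k, by omega, by omega, ?_, ?_⟩
      · rw [List.getElem?_eq_getElem (by omega), List.getElem?_eq_getElem (by omega)]
        simp [hjk.1]
      · rw [List.getElem?_eq_getElem hj1, List.getElem?_eq_getElem hk1]
        simp [hjk.2]
  · rintro ⟨i, j, hij, hj1, e1, e2⟩
    refine ⟨j, by omega, Or.inr (Or.inr ⟨i, by omega, ?_⟩)⟩
    rw [zip1_getElem? l i (by omega), zip1_getElem? l j hj1]
    rw [List.getElem?_eq_getElem (show i < l.length by omega),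
        List.getElem?_eq_getElem (show j < l.length by omega)] at e1
    rw [List.getElem?_eq_getElem (show i + 1 < l.length by omega),
        List.getElem?_eq_getElem (show j + 1 < l.length by omega)] at e2
    simp only [Option.some_inj] at e1 e2
    simp [e1, e2]

theorem check_eq (s : String) : sln2_check s = sln2_altCheck s := by
  unfold sln2_check sln2_altCheck
  have hlen : PySem.Str.len s = (s.toList.length : Int) := by simp
  rw [hlen]
  have hif : ∀ (c x : Bool), (if c then x else false) = (c && x) := by
    intro c x; cases c <;> simp
  rw [hif]
  congr 1
  · exact Bool.coe_iff_coe.mp ((gapA_iff s.toList).trans (gapB_iff s.toList).symm)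
  · exact Bool.coe_iff_coe.mp ((pairA_iff s.toList).trans (pairB_iff s.toList).symm)

-- ===== VERDICT (by name: the statement is the Claim_ definition above) =====
theorem sln2_spec : Claim_equal_sln2 := by
  intro input _
  unfold Spec_sln2 sln2 sln2_alt
  have h : sln2_check = sln2_altCheck := funext check_eq
  rw [h]
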